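-- pv_equiv track=rewrite | github.com/VictorJames11/Workshop-Project | src/simulated_city/routing.py | route_intersects_blocked_segments
-- ===== SOURCE A (Python) =====
-- def route_intersects_blocked_segments(
--     route_nodes: list[str],
--     blocked_segments: set[int],
--     segment_node_pairs: dict[int, tuple[str, str]],
-- ) -> bool:
--     """Return True when a node route traverses at least one blocked segment."""
--
--     traversed_edges = {
--         frozenset((route_nodes[index], route_nodes[index + 1]))
--         for index in range(len(route_nodes) - 1)
--     }
--
--     for segment_id in blocked_segments:
--         edge = segment_node_pairs.get(segment_id)
--         if edge is None:
--             continue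
--         if frozenset(edge) in traversed_edges:
--             return True
--
--     return False
-- ===== SOURCE B (Python) =====
-- def route_intersects_blocked_segments(
--     route_nodes: list[str],
--     blocked_segments: set[int],
--     segment_node_pairs: dict[int, tuple[str, str]],
-- ) -> bool:
--     """Return True when a node route traverses at least one blocked segment."""
--     for index in range(len(route_nodes) - 1):
--         a, b = route_nodes[index], route_nodes[index + 1]
--         for segment_id in blocked_segments:
--             pair = segment_node_pairs.get(segment_id)
--             if pair is None:
--                 continue
--             u, v = pair
--             if (u == a and v == b) or (u == b and v == a):
--                 return True
--     return False
-- ===== Notes on version B (the rewrite author's own statement) =====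
-- stated objective: alternative
-- what changed: B builds no set at all: it brute-force checks each consecutive route edge against each blocked segment's node pair with a direct unordered tuple comparison, instead of A's precomputed hash set of frozenset edges probed while looping over blocked segments.
import Mathlib
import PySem

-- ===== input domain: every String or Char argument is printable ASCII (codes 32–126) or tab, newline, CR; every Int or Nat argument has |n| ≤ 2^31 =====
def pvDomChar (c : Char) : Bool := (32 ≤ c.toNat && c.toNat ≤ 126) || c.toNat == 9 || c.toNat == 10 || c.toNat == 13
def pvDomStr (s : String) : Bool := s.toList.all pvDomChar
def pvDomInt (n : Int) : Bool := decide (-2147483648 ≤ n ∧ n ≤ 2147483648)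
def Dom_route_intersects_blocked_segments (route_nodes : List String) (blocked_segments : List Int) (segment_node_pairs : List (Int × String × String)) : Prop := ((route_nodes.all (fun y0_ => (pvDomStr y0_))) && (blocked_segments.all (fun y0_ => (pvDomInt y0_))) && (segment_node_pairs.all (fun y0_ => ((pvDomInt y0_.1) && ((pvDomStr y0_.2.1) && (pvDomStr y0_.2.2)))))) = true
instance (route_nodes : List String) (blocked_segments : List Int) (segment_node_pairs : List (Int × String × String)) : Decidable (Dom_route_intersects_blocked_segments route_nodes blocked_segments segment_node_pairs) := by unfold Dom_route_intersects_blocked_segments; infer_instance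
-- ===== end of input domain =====

-- B drops the frozenset hash set entirely: a brute-force nested scan compares each consecutive
-- route edge directly (unordered tuple equality) against each blocked segment's node pair
-- (alternative algorithm, O(n*b) instead of A's O(n+b) set probe).


-- ===== PORT A =====
-- frozenset((u,v)) is modelled as the order-normalised pair: {u,v} = {x,y} as frozensets iff the
-- normalised pairs are equal (exact for the two-element frozensets both programs build).
def pvNorm (e : String × String) : String × String := if e.1 ≤ e.2 then e else (e.2, e.1)

-- the for-loop over blocked_segments with its early 'return True'
def pvALoop (traversed : PySem.Set (String × String)) (segment_node_pairs : List (Int × String × String)) : List Int → Bool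
  | [] => false
  | segment_id :: rest =>
    match (PySem.Dict.mk segment_node_pairs).get? segment_id with
    | none => pvALoop traversed segment_node_pairs rest
    | some edge =>
      if traversed.contains (pvNorm edge) then true
      else pvALoop traversed segment_node_pairs rest

def route_intersects_blocked_segments (route_nodes : List String) (blocked_segments : List Int) (segment_node_pairs : List (Int × String × String)) : Bool :=
  -- the set comprehension over range(len(route_nodes) - 1); indices are always in range,
  -- so route_nodes[index] is ported as getD with an unused default
  let traversed : PySem.Set (String × String) :=
    PySem.Set.ofList ((List.range (route_nodes.length - 1)).map
      (fun index => pvNorm (route_nodes.getD index "", route_nodes.getD (index + 1) "")))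
  pvALoop traversed segment_node_pairs blocked_segments

-- ===== PORT B =====
def route_intersects_blocked_segments_alt (route_nodes : List String) (blocked_segments : List Int) (segment_node_pairs : List (Int × String × String)) : Bool :=
  -- outer for-loop over range(len(route_nodes)-1) with early return → List.any over the range;
  -- inner for-loop over blocked_segments with early return → List.any
  (List.range (route_nodes.length - 1)).any (fun index =>
    let a := route_nodes.getD index ""
    let b := route_nodes.getD (index + 1) ""
    blocked_segments.any (fun segment_id =>
      match (PySem.Dict.mk segment_node_pairs).get? segment_id with
      | none => false
      | some (u, v) => (u == a && v == b) || (u == b && v == a)))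

-- ===== PRECONDITION & SPEC =====
def Spec_route_intersects_blocked_segments (route_nodes : List String) (blocked_segments : List Int) (segment_node_pairs : List (Int × String × String)) (out : Bool) : Prop := out = route_intersects_blocked_segments_alt route_nodes blocked_segments segment_node_pairs
instance (route_nodes : List String) (blocked_segments : List Int) (segment_node_pairs : List (Int × String × String)) (out : Bool) : Decidable (Spec_route_intersects_blocked_segments route_nodes blocked_segments segment_node_pairs out) := by unfold Spec_route_intersects_blocked_segments; infer_instance

-- ===== CLAIM (what is proved, stated in full; the proofs are below) =====
def Claim_equal_route_intersects_blocked_segments : Prop := ∀ (route_nodes : List String) (blocked_segments : List Int) (segment_node_pairs : List (Int × String × String)), Dom_route_intersects_blocked_segments route_nodes blocked_segments segment_node_pairs → Spec_route_intersects_blocked_segments route_nodes blocked_segments segment_node_pairs (route_intersects_blocked_segments route_nodes blocked_segments segment_node_pairs)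

-- ===== LEMMAS AND PROOFS =====

-- frozenset equality of two-element tuples = unordered componentwise equality
theorem pvNorm_eq_iff (u v a b : String) :
    pvNorm (u, v) = pvNorm (a, b) ↔ ((u = a ∧ v = b) ∨ (u = b ∧ v = a)) := by
  unfold pvNorm
  split_ifs with h1 h2 h2 <;> dsimp only at h1 h2 <;> simp only [Prod.mk.injEq] <;> constructor
  · rintro ⟨rfl, rfl⟩; exact Or.inl ⟨rfl, rfl⟩
  · rintro (⟨rfl, rfl⟩ | ⟨rfl, rfl⟩)
    · exact ⟨rfl, rfl⟩
    · exact ⟨le_antisymm h1 h2, le_antisymm h2 h1⟩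
  · rintro ⟨rfl, rfl⟩; exact Or.inr ⟨rfl, rfl⟩
  · rintro (⟨rfl, rfl⟩ | ⟨rfl, rfl⟩)
    · exact absurd h1 h2
    · exact ⟨rfl, rfl⟩
  · rintro ⟨rfl, rfl⟩; exact Or.inr ⟨rfl, rfl⟩
  · rintro (⟨rfl, rfl⟩ | ⟨rfl, rfl⟩)
    · exact absurd h2 h1
    · exact ⟨rfl, rfl⟩
  · rintro ⟨rfl, rfl⟩; exact Or.inl ⟨rfl, rfl⟩
  · rintro (⟨rfl, rfl⟩ | ⟨rfl, rfl⟩)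
    · exact ⟨rfl, rfl⟩
    · exact absurd (not_le.mp h1).le h2

-- A's early-return loop as an existential over the blocked segments
theorem pv_aloop_eq_true (traversed : PySem.Set (String × String))
    (spp : List (Int × String × String)) (bs : List Int) :
    pvALoop traversed spp bs = true
      ↔ ∃ sid ∈ bs, ∃ e, (PySem.Dict.mk spp).get? sid = some e ∧ pvNorm e ∈ traversed := by
  induction bs with
  | nil => simp [pvALoop]
  | cons sid rest ih =>
    simp only [pvALoop]
    cases h : (PySem.Dict.mk spp).get? sid with
    | none =>
      rw [ih]
      constructor
      · rintro ⟨sid', hm, e, he, hn⟩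
        exact ⟨sid', List.mem_cons_of_mem _ hm, e, he, hn⟩
      · rintro ⟨sid', hm, e, he, hn⟩
        rcases List.mem_cons.mp hm with rfl | hm'
        · rw [h] at he; cases he
        · exact ⟨sid', hm', e, he, hn⟩
    | some e =>
      have hred : (match some e with
          | none => pvALoop traversed spp rest
          | some edge => if traversed.contains (pvNorm edge) = true then true else pvALoop traversed spp rest)
          = if traversed.contains (pvNorm e) = true then true else pvALoop traversed spp rest := rfl
      rw [hred]
      by_cases hc : traversed.contains (pvNorm e) = true
      · rw [if_pos hc]
        simp only [true_iff]
        exact ⟨sid, List.mem_cons_self, e, h, by simpa using hc⟩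
      · rw [if_neg hc, ih]
        constructor
        · rintro ⟨sid', hm, e', he, hn⟩
          exact ⟨sid', List.mem_cons_of_mem _ hm, e', he, hn⟩
        · rintro ⟨sid', hm, e', he, hn⟩
          rcases List.mem_cons.mp hm with rfl | hm'
          · rw [h] at he; injection he with he'; subst he'
            exact absurd (by simpa using hn) hc
          · exact ⟨sid', hm', e', he, hn⟩

-- B's inner match as an existential
theorem pv_inner_eq_true (spp : List (Int × String × String)) (sid : Int) (a b : String) :
    (match (PySem.Dict.mk spp).get? sid with
      | none => false
      | some (u, v) => (u == a && v == b) || (u == b && v == a)) = true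
    ↔ ∃ e, (PySem.Dict.mk spp).get? sid = some e ∧ pvNorm e = pvNorm (a, b) := by
  cases h : (PySem.Dict.mk spp).get? sid with
  | none => simp
  | some e =>
    obtain ⟨u, v⟩ := e
    simp [pvNorm_eq_iff]

-- ===== VERDICT (by name: the statement is the Claim_ definition above) =====
theorem route_intersects_blocked_segments_spec : Claim_equal_route_intersects_blocked_segments := by
  intro r bs spp _
  unfold Spec_route_intersects_blocked_segments
  unfold route_intersects_blocked_segments route_intersects_blocked_segments_alt
  rw [Bool.eq_iff_iff]
  rw [pv_aloop_eq_true, List.any_eq_true]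
  constructor
  · rintro ⟨sid, hm, e, he, hmem⟩
    rw [PySem.Set.mem_ofList, List.mem_map] at hmem
    rcases hmem with ⟨i, hi, hne⟩
    refine ⟨i, hi, ?_⟩
    rw [List.any_eq_true]
    exact ⟨sid, hm, (pv_inner_eq_true spp sid _ _).mpr ⟨e, he, hne.symm⟩⟩
  · rintro ⟨i, hi, hany⟩
    rw [List.any_eq_true] at hany
    rcases hany with ⟨sid, hm, hmatch⟩
    rcases (pv_inner_eq_true spp sid _ _).mp hmatch with ⟨e, he, hne⟩
    refine ⟨sid, hm, e, he, ?_⟩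
    rw [PySem.Set.mem_ofList, List.mem_map]
    exact ⟨i, hi, hne.symm⟩
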